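-- pv_equiv track=rewrite | github.com/benquick123/code-profiling | code/batch-1/vse-naloge-brez-testov/DN7-M-107.py | preberi_pot
-- ===== SOURCE A (Python) =====
-- def preberi_pot(ukazi):
--     x = 0
--     y = 0
--     pos = 0
--     pot = []
--     pot.append((0, 0))
--     ukazi = ukazi.split("\n")
--     for ukaz in ukazi:
--         if (str(ukaz) == 'DESNO' or str(ukaz) == 'LEVO'):
--             if (str(ukaz) == 'DESNO'):
--                 pos = pos + 1
--                 if (pos >= 4):
--                     pos = pos - 4
--             else:
--                 pos = pos + 3
--                 if (pos >= 4):
--                     pos = pos - 4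
--         else:
--             if pos == 0:
--                 y = y - int(ukaz)
--                 pot.append((x, y))
--             if pos == 1:
--                 x = x + int(ukaz)
--                 pot.append((x, y))
--             if pos == 2:
--                 y = y + int(ukaz)
--                 pot.append((x, y))
--             if pos == 3:
--                 x = x - int(ukaz)
--                 pot.append((x, y))
--     return pot
-- ===== SOURCE B (Python) =====
-- def preberi_pot(ukazi):
--     lines = ukazi.split("\n")
--     DIRS = [(0, -1), (1, 0), (0, 1), (-1, 0)]
--     # stage 1: heading index in effect at each line
--     heads = []
--     h = 0
--     for u in lines:
--         heads.append(h)
--         if u == 'DESNO':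
--             h = (h + 1) % 4
--         elif u == 'LEVO':
--             h = (h - 1) % 4
--     # stage 2: displacement vector of each move line
--     steps = [(DIRS[k][0] * int(u), DIRS[k][1] * int(u))
--              for u, k in zip(lines, heads) if u != 'DESNO' and u != 'LEVO']
--     # stage 3: prefix-sum the displacements into the path
--     pot = [(0, 0)]
--     for dx, dy in steps:
--         x, y = pot[-1]
--         pot.append((x + dx, y + dy))
--     return pot
-- ===== Notes on version B (the rewrite author's own statement) =====
-- stated objective: alternative
-- what changed: Replaces A's single stateful pass (mod-4 heading index plus four position-checking ifs mutating x,y,pot together) by three staged passes: first annotate every line with the heading in effect, then map the move lines to displacement vectors, then prefix-sum the displacements into the path.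
import Mathlib
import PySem

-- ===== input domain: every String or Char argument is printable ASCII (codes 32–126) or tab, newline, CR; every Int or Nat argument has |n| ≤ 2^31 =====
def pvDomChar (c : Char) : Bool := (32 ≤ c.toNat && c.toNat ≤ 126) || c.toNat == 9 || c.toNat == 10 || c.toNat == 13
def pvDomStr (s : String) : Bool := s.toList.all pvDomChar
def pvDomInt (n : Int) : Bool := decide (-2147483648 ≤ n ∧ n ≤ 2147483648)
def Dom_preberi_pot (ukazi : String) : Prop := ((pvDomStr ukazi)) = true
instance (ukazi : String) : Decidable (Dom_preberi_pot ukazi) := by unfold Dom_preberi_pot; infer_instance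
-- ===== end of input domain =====

-- B replaces A's single stateful pass by three staged passes (heading annotation, move→
-- displacement map, prefix sum); return-value equivalence is proved on Pre_ (all lines parse).

-- ===== PORT A =====
-- ukazi.split("\n"); separator is nonempty so split? is always some (getD [] unreachable)
def pvLines (ukazi : String) : List String := (PySem.Str.split? ukazi "\n").getD []

-- one loop iteration of A; int(ukaz) is ofStr? (Pre_ excludes the none case, getD 0 is never reached inside Pre_)
def pvStepA (st : Int × Int × Int × List (Int × Int)) (ukaz : String) :
    Int × Int × Int × List (Int × Int) :=
  let (x, y, pos, pot) := st
  if ukaz = "DESNO" ∨ ukaz = "LEVO" then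
    if ukaz = "DESNO" then
      let pos := pos + 1
      let pos := if pos ≥ 4 then pos - 4 else pos
      (x, y, pos, pot)
    else
      let pos := pos + 3
      let pos := if pos ≥ 4 then pos - 4 else pos
      (x, y, pos, pot)
  else
    let n := (PySem.Int.ofStr? ukaz).getD 0
    -- four sequential independent ifs, exactly as in A
    let (y, pot) := if pos = 0 then (y - n, pot ++ [(x, y - n)]) else (y, pot)
    let (x, pot) := if pos = 1 then (x + n, pot ++ [(x + n, y)]) else (x, pot)
    let (y, pot) := if pos = 2 then (y + n, pot ++ [(x, y + n)]) else (y, pot)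
    let (x, pot) := if pos = 3 then (x - n, pot ++ [(x - n, y)]) else (x, pot)
    (x, y, pos, pot)

def preberi_pot (ukazi : String) : List (Int × Int) :=
  ((pvLines ukazi).foldl pvStepA (0, 0, 0, [(0, 0)])).2.2.2

-- ===== PORT B =====
def pvDirs : List (Int × Int) := [(0, -1), (1, 0), (0, 1), (-1, 0)]

-- stage 1 loop body: heads.append(h); h updated mod 4 on turn lines
def pvHeadsStep (st : List Int × Int) (u : String) : List Int × Int :=
  let (heads, h) := st
  let heads := heads ++ [h]
  if u = "DESNO" then (heads, PySem.Int.mod (h + 1) 4)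
  else if u = "LEVO" then (heads, PySem.Int.mod (h - 1) 4)
  else (heads, h)

-- stage 2: the filtered comprehension over zip(lines, heads); DIRS[k] via pyGet? (k is 0..3)
def pvMovesOf (pairs : List (String × Int)) : List (Int × Int) :=
  pairs.filterMap fun p =>
    if p.1 ≠ "DESNO" ∧ p.1 ≠ "LEVO" then
      let n := (PySem.Int.ofStr? p.1).getD 0
      let d := (PySem.List.pyGet? pvDirs p.2).getD (0, 0)
      some (d.1 * n, d.2 * n)
    else none

-- stage 3 loop body: x, y = pot[-1]; pot.append((x+dx, y+dy))
def pvAccumStep (pot : List (Int × Int)) (d : Int × Int) : List (Int × Int) :=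
  let last := (PySem.List.pyGet? pot (-1)).getD (0, 0)
  pot ++ [(last.1 + d.1, last.2 + d.2)]

def preberi_pot_alt (ukazi : String) : List (Int × Int) :=
  let lines := pvLines ukazi
  let heads := (lines.foldl pvHeadsStep ([], 0)).1
  let steps := pvMovesOf (lines.zip heads)
  steps.foldl pvAccumStep [(0, 0)]

-- ===== PRECONDITION & SPEC =====
-- Pre_ excludes exactly the inputs where A raises ValueError: a line that is neither a
-- turn command nor int()-parseable.
def Pre_preberi_pot (ukazi : String) : Prop :=
  ∀ l ∈ pvLines ukazi,
    l = "DESNO" ∨ l = "LEVO" ∨ (PySem.Int.ofStr? l).isSome = true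
instance (ukazi : String) : Decidable (Pre_preberi_pot ukazi) := by
  unfold Pre_preberi_pot; infer_instance
def pvWitness_preberi_pot : String := "DESNO\n3\nLEVO\n2"

def Spec_preberi_pot (ukazi : String) (out : List (Int × Int)) : Prop := out = preberi_pot_alt ukazi
instance (ukazi : String) (out : List (Int × Int)) : Decidable (Spec_preberi_pot ukazi out) := by unfold Spec_preberi_pot; infer_instance

-- ===== CLAIM (what is proved, stated in full; the proofs are below) =====
def Claim_equal_preberi_pot : Prop := ∀ (ukazi : String), Dom_preberi_pot ukazi → Pre_preberi_pot ukazi → Spec_preberi_pot ukazi (preberi_pot ukazi)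

-- ===== LEMMAS AND PROOFS =====

/-- the heading after one line, as B computes it -/
def pvNext (h : Int) (u : String) : Int :=
  if u = "DESNO" then PySem.Int.mod (h + 1) 4
  else if u = "LEVO" then PySem.Int.mod (h - 1) 4 else h

/-- recursive characterisation of stage 1's heads list -/
def pvHeadsFrom (h : Int) : List String → List Int
  | [] => []
  | u :: tl => h :: pvHeadsFrom (pvNext h u) tl

lemma pvHeadsStep_eq (acc : List Int) (h : Int) (u : String) :
    pvHeadsStep (acc, h) u = (acc ++ [h], pvNext h u) := by
  simp only [pvHeadsStep, pvNext]
  split_ifs <;> rfl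

lemma pvHeads_eq (ls : List String) (acc : List Int) (h : Int) :
    (ls.foldl pvHeadsStep (acc, h)).1 = acc ++ pvHeadsFrom h ls := by
  induction ls generalizing acc h with
  | nil => simp [pvHeadsFrom]
  | cons u tl ih =>
    simp [pvHeadsStep_eq, pvHeadsFrom, ih]

lemma pvLoop_eq (ls : List String) (x y h : Int) (pot : List (Int × Int))
    (hh : h = 0 ∨ h = 1 ∨ h = 2 ∨ h = 3)
    (hlast : (PySem.List.pyGet? pot (-1)).getD (0, 0) = (x, y)) :
    (ls.foldl pvStepA (x, y, h, pot)).2.2.2 =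
      (pvMovesOf (ls.zip (pvHeadsFrom h ls))).foldl pvAccumStep pot := by
  induction ls generalizing x y h pot with
  | nil => simp [pvHeadsFrom, pvMovesOf]
  | cons u tl ih =>
    by_cases hD : u = "DESNO"
    · subst hD
      simp only [pvHeadsFrom, List.zip_cons_cons, pvMovesOf, List.foldl_cons,
        List.filterMap_cons]
      rcases hh with h0 | h0 | h0 | h0 <;> subst h0 <;>
        simpa [pvStepA, pvMovesOf, pvNext] using ih x y _ pot (by decide) hlast
    · by_cases hL : u = "LEVO"
      · subst hL
        simp only [pvHeadsFrom, List.zip_cons_cons, pvMovesOf, List.foldl_cons,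
          List.filterMap_cons]
        rcases hh with h0 | h0 | h0 | h0 <;> subst h0 <;>
          simpa [pvStepA, pvMovesOf, pvNext] using ih x y _ pot (by decide) hlast
      · -- move line
        have hnext : pvNext h u = h := by simp [pvNext, hD, hL]
        have hm : ∀ (k : Int) (rest : List (String × Int)), pvMovesOf ((u, k) :: rest) =
            (((PySem.List.pyGet? pvDirs k).getD (0, 0)).1 * (PySem.Int.ofStr? u).getD 0,
             ((PySem.List.pyGet? pvDirs k).getD (0, 0)).2 * (PySem.Int.ofStr? u).getD 0)
              :: pvMovesOf rest := by
          intro k rest; simp [pvMovesOf, hD, hL]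
        have hacc : ∀ d : Int × Int, pvAccumStep pot d = pot ++ [(x + d.1, y + d.2)] := by
          intro d; simp [pvAccumStep, hlast]
        have hd0 : (PySem.List.pyGet? pvDirs (0 : Int)).getD (0, 0) = ((0 : Int), (-1 : Int)) := by decide
        have hd1 : (PySem.List.pyGet? pvDirs (1 : Int)).getD (0, 0) = ((1 : Int), (0 : Int)) := by decide
        have hd2 : (PySem.List.pyGet? pvDirs (2 : Int)).getD (0, 0) = ((0 : Int), (1 : Int)) := by decide
        have hd3 : (PySem.List.pyGet? pvDirs (3 : Int)).getD (0, 0) = ((-1 : Int), (0 : Int)) := by decide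
        rcases hh with h0 | h0 | h0 | h0 <;> subst h0 <;>
        · rw [pvHeadsFrom, hnext, List.zip_cons_cons, hm, List.foldl_cons, List.foldl_cons, hacc]
          simp only [hd0, hd1, hd2, hd3, pvStepA, hD, hL, or_self, if_false]
          norm_num
          apply ih
          · decide
          · simp [PySem.List.pyGet?_neg_one_append_singleton]

-- ===== VERDICT (by name: the statement is the Claim_ definition above) =====
theorem preberi_pot_spec : Claim_equal_preberi_pot := by
  intro ukazi _ _
  unfold Spec_preberi_pot preberi_pot
  show _ = (pvMovesOf ((pvLines ukazi).zip
      ((pvLines ukazi).foldl pvHeadsStep ([], 0)).1)).foldl pvAccumStep [(0, 0)]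
  rw [pvHeads_eq, List.nil_append]
  exact pvLoop_eq (pvLines ukazi) 0 0 0 [(0, 0)] (by decide) (by decide)
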